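-- pv_equiv track=rewrite | github.com/Lohnahmin/IowaState_CS1270 | Labweek9/wordSwap.py | b2
-- ===== SOURCE A (Python) =====
-- def b2(s):
--     vowel = ['a', 'e', 'i', 'o', 'u']
--     result = ""
--     s = s.lower()
--     for i in range(len(s)):
--         result += s[i]
--         if i == len(s)-1:
--             continue
--         if s[i] in vowel and s[i + 1] in vowel:
--             result += s[i] * 2
--     return result
-- ===== SOURCE B (Python) =====
-- def b2(s):
--     # Run-based: split the lowercased string into maximal runs of vowels;
--     # inside a vowel run every vowel except the last is followed by a vowel,
--     # so it is emitted three times and the run's last vowel once.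
--     t = s.lower()
--     vowels = "aeiou"
--     out = []
--     i = 0
--     n = len(t)
--     while i < n:
--         if t[i] in vowels:
--             j = i
--             while j < n and t[j] in vowels:
--                 j += 1
--             run = t[i:j]
--             out.append("".join(c * 3 for c in run[:-1]) + run[-1])
--             i = j
--         else:
--             out.append(t[i])
--             i += 1
--     return "".join(out)
-- ===== Notes on version B (the rewrite author's own statement) =====
-- stated objective: alternative
-- what changed: A checks each index's neighbour one position at a time with string += concatenation; B instead splits the lowercased string into maximal runs of consecutive vowels, emits every vowel of a run tripled except the run's last, copies non-vowel characters, and joins once at the end.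
import Mathlib
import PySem

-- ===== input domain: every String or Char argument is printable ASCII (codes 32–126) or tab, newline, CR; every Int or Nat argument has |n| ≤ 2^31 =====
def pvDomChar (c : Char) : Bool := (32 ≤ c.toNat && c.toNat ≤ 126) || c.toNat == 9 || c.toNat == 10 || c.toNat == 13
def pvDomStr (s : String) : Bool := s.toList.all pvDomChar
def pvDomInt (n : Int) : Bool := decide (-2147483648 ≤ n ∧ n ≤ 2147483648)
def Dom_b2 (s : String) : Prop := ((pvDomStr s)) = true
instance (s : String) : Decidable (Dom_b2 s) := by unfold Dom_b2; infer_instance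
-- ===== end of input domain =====

-- B replaces A's per-index neighbour check by a run-based algorithm: split the lowercased
-- string into maximal runs of vowels and triple every vowel of a run except its last.
-- Objective: alternative decomposition, same O(n) work per character.

-- ===== PORT A =====
-- loop body of A, kept step for step (result += s[i]; continue on last index; vowel test on s[i], s[i+1])
def bodyA (t : List Char) (result : List Char) (i : Int) : List Char :=
  let vowel : List Char := ['a', 'e', 'i', 'o', 'u']
  let c := PySem.List.pyGetD t i ' '
  let result := result ++ [c]
  if i = (t.length : Int) - 1 then result
  else if c ∈ vowel ∧ PySem.List.pyGetD t (i + 1) ' ' ∈ vowel then result ++ [c, c]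
  else result

def b2 (s : String) : String :=
  let t := (PySem.Str.lower s).toList
  String.mk ((PySem.List.pyRange 0 (t.length : Int) 1).foldl (bodyA t) [])

-- ===== PORT B =====
-- vowel test of B ("c in vowels")
def vowB (c : Char) : Bool := ['a', 'e', 'i', 'o', 'u'].contains c

-- B's while loop over the remaining characters: a vowel head consumes its whole maximal
-- vowel run (takeWhile/dropWhile = the scan for j and the slice t[i:j]) and emits each
-- run character tripled except the last; a non-vowel head is copied.
def goB : List Char → List Char
  | [] => []
  | c :: rest =>
    if vowB c then
      let run := List.takeWhile vowB (c :: rest)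
      run.dropLast.flatMap (fun v => [v, v, v]) ++ run.getLastD ' ' ::
        goB (List.dropWhile vowB (c :: rest))
    else
      c :: goB rest
termination_by l => l.length
decreasing_by
  · simp only [List.dropWhile_cons, *, if_pos]
    have := List.length_dropWhile_le vowB rest
    simp; omega
  · simp

def b2_alt (s : String) : String :=
  String.mk (goB (PySem.Str.lower s).toList)

-- ===== PRECONDITION & SPEC =====
def Spec_b2 (s : String) (out : String) : Prop := out = b2_alt s
instance (s : String) (out : String) : Decidable (Spec_b2 s out) := by unfold Spec_b2; infer_instance

-- ===== CLAIM (what is proved, stated in full; the proofs are below) =====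
def Claim_equal_b2 : Prop := ∀ (s : String), Dom_b2 s → Spec_b2 s (b2 s)

-- ===== LEMMAS AND PROOFS =====

-- the chunk A's loop body appends at index i, as a pure function of i
def gchunk (l : List Char) (i : Int) : List Char :=
  let vowel : List Char := ['a', 'e', 'i', 'o', 'u']
  let c := PySem.List.pyGetD l i ' '
  [c] ++ (if i = (l.length : Int) - 1 then []
          else if c ∈ vowel ∧ PySem.List.pyGetD l (i + 1) ' ' ∈ vowel then [c, c]
          else [])

-- intermediate characterisation: pairwise chunks
def bchars (l : List Char) : List Char :=
  let vowels : List Char := ['a', 'e', 'i', 'o', 'u']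
  ((l.zip l.tail).map
      (fun p => if p.1 ∈ vowels ∧ p.2 ∈ vowels then [p.1, p.1, p.1] else [p.1])).flatten
    ++ (match l.getLast? with | some c => [c] | none => [])

lemma gchunk_cons_succ (a : Char) (l : List Char) (k : Nat) :
    gchunk (a :: l) ((k : Int) + 1) = gchunk l (k : Int) := by
  have e1 : PySem.List.pyGetD (a :: l) ((k : Int) + 1) ' ' = PySem.List.pyGetD l (k : Int) ' ' := by
    rw [show ((k : Int) + 1) = ((k + 1 : Nat) : Int) by push_cast; ring,
        PySem.List.pyGetD_natCast, PySem.List.pyGetD_natCast]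
    simp
  have e2 : PySem.List.pyGetD (a :: l) ((k : Int) + 1 + 1) ' '
      = PySem.List.pyGetD l ((k : Int) + 1) ' ' := by
    rw [show ((k : Int) + 1 + 1) = ((k + 2 : Nat) : Int) by push_cast; ring,
        show ((k : Int) + 1) = ((k + 1 : Nat) : Int) by push_cast; ring,
        PySem.List.pyGetD_natCast, PySem.List.pyGetD_natCast]
    simp
  have e3 : ((k : Int) + 1 = (((a :: l).length : Int)) - 1) ↔
      ((k : Int) = ((l.length : Int)) - 1) := by push_cast [List.length_cons]; omega
  simp only [gchunk, e1, e2, e3]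

lemma gchunk_zero (a b : Char) (r : List Char) :
    gchunk (a :: b :: r) ((0 : Nat) : Int) =
      [a] ++ (if (a = 'a' ∨ a = 'e' ∨ a = 'i' ∨ a = 'o' ∨ a = 'u') ∧
                 (b = 'a' ∨ b = 'e' ∨ b = 'i' ∨ b = 'o' ∨ b = 'u')
              then [a, a] else []) := by
  have hne : ¬ (((0 : Nat) : Int) = (((a :: b :: r).length : Int)) - 1) := by
    push_cast [List.length_cons]; omega
  have h1 : (((0 : Nat) : Int) + 1) = ((1 : Nat) : Int) := by norm_num
  rw [gchunk, h1, PySem.List.pyGetD_natCast, PySem.List.pyGetD_natCast, if_neg hne]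
  simp

lemma main_lemma (l : List Char) :
    (List.range l.length).flatMap (fun (k : Nat) => gchunk l (k : Int)) = bchars l := by
  induction l with
  | nil => simp [bchars]
  | cons a l ih =>
    rw [show (a :: l).length = l.length + 1 from rfl, List.range_succ_eq_map,
        List.flatMap_cons, List.flatMap_map]
    have hshift : (fun (k : Nat) => gchunk (a :: l) ((k.succ : Nat) : Int)) =
        (fun (k : Nat) => gchunk l (k : Int)) := by
      funext k
      have h : ((Nat.succ k : Nat) : Int) = (k : Int) + 1 := by push_cast; ring
      simp only [h, gchunk_cons_succ]
    simp only [hshift, ih]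
    cases l with
    | nil => simp [gchunk, bchars]
    | cons b r =>
      rw [gchunk_zero]
      by_cases hv : (a = 'a' ∨ a = 'e' ∨ a = 'i' ∨ a = 'o' ∨ a = 'u') ∧
          (b = 'a' ∨ b = 'e' ∨ b = 'i' ∨ b = 'o' ∨ b = 'u') <;>
        simp [bchars, hv, List.zip]

lemma bodyA_eq (t : List Char) : bodyA t = fun result i => result ++ gchunk t i := by
  funext result i
  simp only [bodyA, gchunk]
  split_ifs <;> simp

lemma listsA (l : List Char) :
    (PySem.List.pyRange 0 (l.length : Int) 1).foldl (bodyA l) [] = bchars l := by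
  rw [bodyA_eq, PySem.List.foldl_append_eq_flatMap, List.nil_append,
      PySem.List.pyRange_one, List.flatMap_map]
  have h : (fun (k : Nat) => gchunk l ((0 : Int) + (k : Int))) =
      (fun (k : Nat) => gchunk l (k : Int)) := by funext k; norm_num
  simp only [Int.sub_zero, Int.toNat_natCast, h]
  exact main_lemma l

lemma vowB_iff (a : Char) :
    vowB a = true ↔ (a = 'a' ∨ a = 'e' ∨ a = 'i' ∨ a = 'o' ∨ a = 'u') := by
  simp [vowB]

-- pairwise recurrence for bchars
lemma bchars_step (a b : Char) (r : List Char) :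
    bchars (a :: b :: r) =
      (if vowB a && vowB b then [a, a, a] else [a]) ++ bchars (b :: r) := by
  by_cases hP : (a = 'a' ∨ a = 'e' ∨ a = 'i' ∨ a = 'o' ∨ a = 'u') ∧
      (b = 'a' ∨ b = 'e' ∨ b = 'i' ∨ b = 'o' ∨ b = 'u') <;>
    simp [bchars, Bool.and_eq_true, vowB_iff, hP, List.zip]

-- the same recurrence for B's run-based loop
lemma goB_single (a : Char) : goB [a] = [a] := by
  by_cases h : vowB a = true <;> simp [goB, h, List.takeWhile, List.dropWhile]

lemma goB_step (a b : Char) (r : List Char) :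
    goB (a :: b :: r) =
      (if vowB a && vowB b then [a, a, a] else [a]) ++ goB (b :: r) := by
  by_cases ha : vowB a = true
  · by_cases hb : vowB b = true
    · rw [goB, goB]
      simp [ha, hb]
    · have hb' : vowB b = false := by simpa using hb
      rw [goB]
      simp [ha, hb']
  · have ha' : vowB a = false := by simpa using ha
    rw [goB]
    simp [ha']

lemma bchars_eq_goB (l : List Char) : bchars l = goB l := by
  induction l with
  | nil => simp [bchars, goB]
  | cons a l ih =>
    cases l with
    | nil => simp [bchars, goB_single, List.zip]
    | cons b r => rw [bchars_step, goB_step, ih]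

-- ===== VERDICT (by name: the statement is the Claim_ definition above) =====
theorem b2_spec : Claim_equal_b2 := by
  intro s _
  show String.mk ((PySem.List.pyRange 0 (((PySem.Str.lower s).toList).length : Int) 1).foldl
      (bodyA ((PySem.Str.lower s).toList)) [])
    = String.mk (goB ((PySem.Str.lower s).toList))
  exact congrArg String.mk ((listsA _).trans (bchars_eq_goB _))
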